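-- pv_equiv track=rewrite | github.com/wxhfy/new_project | removal/sequence_postprocess.py | process_file_mapping_chunk
-- ===== SOURCE A (Python) =====
-- from collections import defaultdict, Counter
--
-- def process_file_mapping_chunk(chunk, remaining_ids):
--     """处理文件映射块 - 向量化优化版"""
--     # 预先将remaining_ids转换为集合以加速查找
--     remaining_ids_set = set(remaining_ids)
--
--     # 使用字典推导式批量计算交集
--     # 这比循环逐一处理每个文件要高效得多
--     intersections = {file_path: ids.intersection(remaining_ids_set)
--                      for file_path, ids in chunk.items()}
--
--     # 筛选出有交集的文件
--     local_matched_files = {file_path for file_path, common_ids in intersections.items()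
--                            if common_ids}
--
--     # 构建ID到文件的映射 - 使用defaultdict避免重复检查键是否存在
--     local_id_to_files = defaultdict(list)
--
--     # 只处理有交集的文件，减少计算量
--     for file_path, common_ids in intersections.items():
--         if common_ids:  # 如果有交集，则此文件需要加载
--             for graph_id in common_ids:
--                 local_id_to_files[graph_id].append(file_path)
--
--     return dict(local_id_to_files), local_matched_files
-- ===== SOURCE B (Python) =====
-- from collections import defaultdict
--
-- def process_file_mapping_chunk(chunk, remaining_ids):
--     """Inverted-index version: invert the whole chunk into an id->files index
--     in one nested loop, then keep only the remaining ids; no per-file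
--     intersection sets are ever materialized."""
--     occ = defaultdict(list)
--     for file_path, ids in chunk.items():
--         for graph_id in ids:
--             occ[graph_id].append(file_path)
--     remaining_ids_set = set(remaining_ids)
--     local_id_to_files = {graph_id: files for graph_id, files in occ.items()
--                          if graph_id in remaining_ids_set}
--     local_matched_files = {file_path for file_path, ids in chunk.items()
--                            if not remaining_ids_set.isdisjoint(ids)}
--     return local_id_to_files, local_matched_files
-- ===== Notes on version B (the rewrite author's own statement) =====
-- stated objective: alternative
-- what changed: B never computes a per-file intersection: it inverts the whole chunk into an id->files index with one nested loop, obtains the result dict by filtering that index against set(remaining_ids), and tests files for matching with a short-circuiting isdisjoint instead of materializing intersection sets.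
import Mathlib
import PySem

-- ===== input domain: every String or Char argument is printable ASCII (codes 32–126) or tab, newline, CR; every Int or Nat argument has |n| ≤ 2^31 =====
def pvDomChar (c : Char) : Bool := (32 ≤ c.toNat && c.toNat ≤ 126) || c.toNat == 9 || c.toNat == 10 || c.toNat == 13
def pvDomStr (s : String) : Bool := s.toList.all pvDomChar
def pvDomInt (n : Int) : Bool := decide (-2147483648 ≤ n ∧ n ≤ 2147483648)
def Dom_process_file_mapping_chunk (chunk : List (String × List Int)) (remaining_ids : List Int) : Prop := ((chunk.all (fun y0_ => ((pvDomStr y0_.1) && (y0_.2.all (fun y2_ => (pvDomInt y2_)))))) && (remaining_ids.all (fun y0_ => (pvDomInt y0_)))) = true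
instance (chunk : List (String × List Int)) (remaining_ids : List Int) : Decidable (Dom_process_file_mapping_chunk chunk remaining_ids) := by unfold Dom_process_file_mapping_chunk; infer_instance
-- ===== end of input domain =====

-- B builds a full id->files inverted index of the chunk and then filters it by the remaining-id
-- set, instead of A's per-file intersection table (objective: alternative decomposition).

-- ===== PORT A =====
def process_file_mapping_chunk (chunk : List (String × List Int)) (remaining_ids : List Int) : (List (Int × List String)) × List String :=
  let remaining_ids_set : PySem.Set Int := PySem.Set.ofList remaining_ids
  -- dict comprehension: {file_path: ids.intersection(remaining_ids_set) for file_path, ids in chunk.items()}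
  let intersections : List (String × List Int) :=
    chunk.map (fun p => (p.1, PySem.Set.inter p.2 remaining_ids_set))
  -- set comprehension: {file_path for file_path, common_ids in intersections.items() if common_ids}
  let local_matched_files : PySem.Set String :=
    PySem.Set.ofList ((intersections.filter (fun p => !p.2.isEmpty)).map (fun p => p.1))
  -- loop: for file_path, common_ids in intersections.items(): if common_ids: for graph_id in common_ids: append
  let local_id_to_files : PySem.Dict Int (List String) :=
    intersections.foldl
      (fun d p =>
        if !p.2.isEmpty then
          p.2.foldl (fun d g => d.modify g [] (fun l => l ++ [p.1])) d
        else d)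
      PySem.Dict.empty
  (local_id_to_files.items, local_matched_files)

-- ===== PORT B =====
def process_file_mapping_chunk_alt (chunk : List (String × List Int)) (remaining_ids : List Int) : (List (Int × List String)) × List String :=
  -- occ = defaultdict(list); for file_path, ids in chunk.items(): for graph_id in ids: occ[graph_id].append(file_path)
  let occ : PySem.Dict Int (List String) :=
    chunk.foldl
      (fun d p => p.2.foldl (fun d g => d.modify g [] (fun l => l ++ [p.1])) d)
      PySem.Dict.empty
  let remaining_ids_set : PySem.Set Int := PySem.Set.ofList remaining_ids
  -- dict comprehension {graph_id: files for graph_id, files in occ.items() if graph_id in remaining_ids_set}: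
  -- occ's keys are unique, so the comprehension's items are exactly the filtered items of occ
  let local_id_to_files : List (Int × List String) :=
    occ.items.filter (fun kv => remaining_ids_set.contains kv.1)
  -- {file_path for file_path, ids in chunk.items() if not remaining_ids_set.isdisjoint(ids)}
  let local_matched_files : PySem.Set String :=
    PySem.Set.ofList
      ((chunk.filter (fun p => !(PySem.Set.isdisjoint remaining_ids_set p.2))).map (fun p => p.1))
  (local_id_to_files, local_matched_files)

-- ===== PRECONDITION & SPEC =====
def Spec_process_file_mapping_chunk (chunk : List (String × List Int)) (remaining_ids : List Int) (out : (List (Int × List String)) × List String) : Prop := out = process_file_mapping_chunk_alt chunk remaining_ids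
instance (chunk : List (String × List Int)) (remaining_ids : List Int) (out : (List (Int × List String)) × List String) : Decidable (Spec_process_file_mapping_chunk chunk remaining_ids out) := by unfold Spec_process_file_mapping_chunk; infer_instance

-- ===== CLAIM (what is proved, stated in full; the proofs are below) =====
def Claim_equal_process_file_mapping_chunk : Prop := ∀ (chunk : List (String × List Int)) (remaining_ids : List Int), Dom_process_file_mapping_chunk chunk remaining_ids → Spec_process_file_mapping_chunk chunk remaining_ids (process_file_mapping_chunk chunk remaining_ids)

-- ===== LEMMAS AND PROOFS =====

-- a nested fold over the pieces equals one fold over the flattened list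
theorem foldl_foldl_flatMap {α β δ : Type} (l : List α) (g : α → List β)
    (f : δ → β → δ) (d : δ) :
    l.foldl (fun d a => (g a).foldl f d) d = (l.flatMap g).foldl f d := by
  induction l generalizing d with
  | nil => rfl
  | cons hd tl ih => simp [List.flatMap_cons, List.foldl_append, ih]

-- set(...) commutes with filtering
theorem ofList_filter {α : Type} [BEq α] [LawfulBEq α] (p : α → Bool) (xs : List α) :
    PySem.Set.ofList (xs.filter p) = (PySem.Set.ofList xs).filter p := by
  induction xs with
  | nil => rfl
  | cons x xs ih =>
    by_cases h : p x = true
    · rw [List.filter_cons_of_pos h, PySem.Set.ofList_cons, PySem.Set.ofList_cons, ih,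
        List.filter_cons_of_pos h]
      refine congrArg (x :: ·) ?_
      simp only [PySem.Set.discard, List.filter_filter]
      refine List.filter_congr ?_
      intro a _
      exact Bool.and_comm _ _
    · have hx : p x = false := by simpa using h
      rw [List.filter_cons_of_neg (by simp [hx]), ih, PySem.Set.ofList_cons,
        List.filter_cons_of_neg (by simp [hx])]
      simp only [PySem.Set.discard, List.filter_filter]
      refine List.filter_congr ?_
      intro a _
      by_cases hax : a = x
      · subst hax; simp [hx]
      · simp [hax]

-- the grouping fold over a key-filtered pair list produces exactly the key-filtered items
theorem dict_filter_items (L : List (Int × String)) (pred : Int → Bool) :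
    ((L.filter (fun q => pred q.1)).foldl
        (fun d q => d.modify q.1 [] (fun l => l ++ [q.2])) PySem.Dict.empty).items
      = ((L.foldl (fun d q => d.modify q.1 [] (fun l => l ++ [q.2]))
            PySem.Dict.empty).items).filter (fun kv => pred kv.1) := by
  have nd1 := PySem.Dict.nodup_keys_foldl_modify_key (L.filter (fun q => pred q.1))
      Prod.fst [] (fun _ q => (fun l => l ++ [q.2])) PySem.Dict.empty
      (by simp)
  have nd2 := PySem.Dict.nodup_keys_foldl_modify_key L
      Prod.fst [] (fun _ q => (fun l => l ++ [q.2])) PySem.Dict.empty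
      (by simp)
  rw [PySem.Dict.items_eq_map_keys _ nd1 [], PySem.Dict.items_eq_map_keys _ nd2 []]
  rw [PySem.Dict.keys_foldl_modify_key (L.filter (fun q => pred q.1))
        Prod.fst [] (fun _ q => (fun l => l ++ [q.2])),
      PySem.Dict.keys_foldl_modify_key L Prod.fst [] (fun _ q => (fun l => l ++ [q.2]))]
  simp only [PySem.Dict.keys_empty, PySem.Set.update_nil_left]
  have hkeys : List.map Prod.fst (L.filter (fun q => pred q.1)) = (L.map Prod.fst).filter pred := by
    rw [List.filter_map]; rfl
  rw [hkeys, ofList_filter]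
  rw [List.filter_map]
  refine List.map_congr_left ?_
  intro k hk
  have hpk : pred k = true := by
    have := List.of_mem_filter hk; simpa using this
  simp only [PySem.Dict.getD_foldl_modify_append, PySem.Dict.getD_empty, List.nil_append,
    List.filter_filter]
  refine congrArg (fun t => (k, List.map Prod.snd t)) (List.filter_congr ?_)
  intro q _
  by_cases hq : q.1 = k
  · simp [hq, hpk]
  · simp [hq]

-- a nonempty-intersection test equals a non-disjointness test
theorem nonempty_inter_eq_not_isdisjoint (rset ids : List Int) :
    (!(PySem.Set.inter ids rset).isEmpty) = (!(PySem.Set.isdisjoint rset ids)) := by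
  simp only [PySem.Set.inter, PySem.Set.isdisjoint, Bool.not_not]
  rw [Bool.eq_iff_iff]
  simp only [Bool.not_eq_true', List.isEmpty_eq_false_iff_exists_mem, List.any_eq_true,
    List.mem_filter, PySem.Set.contains_eq_listContains, List.contains_iff_mem]
  constructor
  · rintro ⟨x, hx, hr⟩; exact ⟨x, hr, hx⟩
  · rintro ⟨x, hr, hx⟩; exact ⟨x, hx, hr⟩

-- ===== VERDICT (by name: the statement is the Claim_ definition above) =====
theorem process_file_mapping_chunk_spec : Claim_equal_process_file_mapping_chunk := by
  intro chunk remaining_ids hdom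
  clear hdom
  unfold Spec_process_file_mapping_chunk process_file_mapping_chunk process_file_mapping_chunk_alt
  dsimp only
  set rset : PySem.Set Int := PySem.Set.ofList remaining_ids with hrset
  refine Prod.ext ?_ ?_
  · -- the dict side
    dsimp only
    -- drop A's redundant emptiness guard (folding over an empty list is the identity)
    have hguard :
        (fun (d : PySem.Dict Int (List String)) (p : String × List Int) =>
          if !p.2.isEmpty then
            p.2.foldl (fun d g => d.modify g [] (fun l => l ++ [p.1])) d
          else d)
        = (fun d p => p.2.foldl (fun d g => d.modify g [] (fun l => l ++ [p.1])) d) := by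
      funext d p
      by_cases h : p.2.isEmpty = true
      · have : p.2 = [] := List.isEmpty_iff.mp h
        simp [this]
      · simp [h]
    rw [hguard, List.foldl_map]
    -- turn each inner fold into a fold over (id, file) pairs, then flatten
    have hpairs :
        (fun (d : PySem.Dict Int (List String)) (p : String × List Int) =>
          (PySem.Set.inter p.2 rset).foldl (fun d g => d.modify g [] (fun l => l ++ [p.1])) d)
        = (fun d p =>
            ((PySem.Set.inter p.2 rset).map (fun g => (g, p.1))).foldl
              (fun d q => d.modify q.1 [] (fun l => l ++ [q.2])) d) := by
      funext d p; rw [List.foldl_map]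
    have hpairsB :
        (fun (d : PySem.Dict Int (List String)) (p : String × List Int) =>
          p.2.foldl (fun d g => d.modify g [] (fun l => l ++ [p.1])) d)
        = (fun d p =>
            (p.2.map (fun g => (g, p.1))).foldl
              (fun d q => d.modify q.1 [] (fun l => l ++ [q.2])) d) := by
      funext d p; rw [List.foldl_map]
    rw [hpairs, hpairsB,
        foldl_foldl_flatMap chunk (fun p => (PySem.Set.inter p.2 rset).map (fun g => (g, p.1))),
        foldl_foldl_flatMap chunk (fun p => p.2.map (fun g => (g, p.1)))]
    have hflat :
        chunk.flatMap (fun p => (PySem.Set.inter p.2 rset).map (fun g => (g, p.1)))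
        = (chunk.flatMap (fun p => p.2.map (fun g => (g, p.1)))).filter
            (fun q => rset.contains q.1) := by
      induction chunk with
      | nil => rfl
      | cons hd tl ih =>
        have hhd : (PySem.Set.inter hd.2 rset).map (fun g => (g, hd.1))
            = (hd.2.map (fun g => (g, hd.1))).filter (fun q => rset.contains q.1) := by
          rw [List.filter_map]; rfl
        simp only [List.flatMap_cons, List.filter_append, ih, hhd]

    rw [hflat, dict_filter_items]
  · -- the matched-files side
    dsimp only
    rw [List.filter_map, List.map_map]
    refine congrArg PySem.Set.ofList (congrArg (List.map _) (List.filter_congr ?_))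
    intro p _
    exact nonempty_inter_eq_not_isdisjoint rset p.2
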